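-- pv_equiv track=rewrite | github.com/RawRapter/python-vscode | ProgPracFol/BasicsProgramSet6.py | KthNonRep1
-- ===== SOURCE A (Python) =====
-- def KthNonRep1(x,k):
--     l1 = list(x)
--     d1 = {keys:x.count(keys) for keys in l1}
--     l2 = [keys for keys,value in d1.items() if value == 1]
--     if len(l2) < k:
--         return "List doesnt have the kth non repeating character"
--     else:
--         return l2[k-1]
-- ===== SOURCE B (Python) =====
-- def KthNonRep1(x, k):
--     seen = set()
--     cand = dict()  # ordered dict of live non-repeating candidates
--     for c in x:
--         if c in seen:
--             cand.pop(c, None)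
--         else:
--             seen.add(c)
--             cand[c] = None
--     l2 = list(cand)
--     if len(l2) < k:
--         return "List doesnt have the kth non repeating character"
--     else:
--         return l2[k-1]
-- ===== Notes on version B (the rewrite author's own statement) =====
-- stated objective: faster
-- what changed: Replaces A's per-character x.count scan plus count-dict filter with a single pass maintaining a seen set and an ordered dict of live non-repeating candidates (dropped on second occurrence); the tail (error string, l2[k-1]) is unchanged.
import Mathlib
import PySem

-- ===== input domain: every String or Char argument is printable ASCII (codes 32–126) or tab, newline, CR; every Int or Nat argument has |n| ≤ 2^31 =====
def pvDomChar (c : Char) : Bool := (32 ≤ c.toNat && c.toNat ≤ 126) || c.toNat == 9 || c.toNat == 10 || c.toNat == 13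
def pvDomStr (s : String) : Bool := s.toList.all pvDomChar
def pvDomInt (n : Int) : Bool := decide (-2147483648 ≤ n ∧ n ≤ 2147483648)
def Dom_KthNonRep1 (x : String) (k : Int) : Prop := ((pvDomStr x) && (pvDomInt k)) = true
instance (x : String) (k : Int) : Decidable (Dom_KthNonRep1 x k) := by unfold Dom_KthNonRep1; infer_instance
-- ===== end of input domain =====

-- B replaces A's quadratic per-character x.count scan with one linear pass keeping a seen set and an
-- ordered dict of live candidates; the tail (error string, l2[k-1]) is unchanged.

-- ===== PORT A =====
-- x.count(keys) on the 1-character string keys is exactly the character count, ported as l1.count c.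
def KthNonRep1 (x : String) (k : Int) : String :=
  let l1 := x.toList
  let d1 : PySem.Dict Char Int :=
    l1.foldl (fun d c => d.insert c (l1.count c : Int)) PySem.Dict.empty
  let l2 : List Char := (d1.items.filter (fun p => p.2 == 1)).map (fun p => p.1)
  if (l2.length : Int) < k then "List doesnt have the kth non repeating character"
  else
    match PySem.List.pyGet? l2 (k - 1) with
    | some c => String.ofList [c]   -- the element itself (a 1-char string in Python)
    | none => ""                -- IndexError; excluded by Pre_

-- ===== PORT B =====
-- cand.pop(c, None) only removes the key, ported as Dict.erase.
def KthNonRep1_alt (x : String) (k : Int) : String :=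
  let st := x.toList.foldl
    (fun (st : PySem.Set Char × PySem.Dict Char (Option Unit)) c =>
      if PySem.Set.contains st.1 c then (st.1, st.2.erase c)
      else (PySem.Set.add st.1 c, st.2.insert c none))
    (PySem.Set.empty, PySem.Dict.empty)
  let l2 : List Char := st.2.keys
  if (l2.length : Int) < k then "List doesnt have the kth non repeating character"
  else
    match PySem.List.pyGet? l2 (k - 1) with
    | some c => String.ofList [c]
    | none => ""                -- IndexError; excluded by Pre_

-- ===== PRECONDITION & SPEC =====
-- Pre_ excludes exactly the inputs on which A raises IndexError: k ≤ 0 together with fewer than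
-- 1-k non-repeating characters, where l2[k-1] is an out-of-range negative index. A returns on
-- every admitted input.
def Pre_KthNonRep1 (x : String) (k : Int) : Prop :=
  1 ≤ k ∨ 1 - k ≤ ((x.toList.filter (fun c => x.toList.count c == 1)).length : Int)
instance (x : String) (k : Int) : Decidable (Pre_KthNonRep1 x k) := by
  unfold Pre_KthNonRep1; infer_instance
def pvWitness_KthNonRep1 : String × Int := ("aabc", 1)

def Spec_KthNonRep1 (x : String) (k : Int) (out : String) : Prop := out = KthNonRep1_alt x k
instance (x : String) (k : Int) (out : String) : Decidable (Spec_KthNonRep1 x k out) := by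
  unfold Spec_KthNonRep1; infer_instance

-- ===== CLAIM (what is proved, stated in full; the proofs are below) =====
def Claim_equal_KthNonRep1 : Prop :=
  ∀ (x : String) (k : Int), Dom_KthNonRep1 x k → Pre_KthNonRep1 x k →
    Spec_KthNonRep1 x k (KthNonRep1 x k)

-- ===== LEMMAS AND PROOFS =====

-- A's dict comprehension: items are the distinct characters in first-occurrence order, each
-- paired with its (key-only-dependent) value.
theorem dictA_items (l : List Char) (f : Char → Int) :
    (l.foldl (fun d c => d.insert c (f c)) PySem.Dict.empty).items
      = (PySem.Set.ofList l).map (fun c => (c, f c)) := by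
  induction l using List.reverseRecOn with
  | nil => rfl
  | append_singleton l c ih =>
    rw [List.foldl_append, List.foldl_cons, List.foldl_nil, PySem.Set.ofList_append_singleton]
    have hcont : (l.foldl (fun d c => d.insert c (f c)) PySem.Dict.empty).contains c
        = decide (c ∈ l) := by
      rw [PySem.Dict.contains_eq_decide_mem_keys]
      simp [PySem.Dict.keys, ih, PySem.Set.mem_ofList]
    by_cases hc : c ∈ l
    · rw [PySem.Dict.items_insert_of_contains _ _ (by simp [hcont, hc]), ih,
        PySem.Set.add_of_mem ((PySem.Set.mem_ofList _ _).mpr hc), List.map_map]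
      apply List.map_congr_left
      intro a _
      by_cases hac : a = c <;> simp [hac]
    · rw [PySem.Dict.items_insert_of_not_contains _ _ (by simp [hcont, hc]), ih,
        PySem.Set.add_of_not_mem (fun h => hc ((PySem.Set.mem_ofList _ _).mp h)),
        List.map_append]
      rfl

-- B's single pass: seen = set of all characters, cand's items = the characters occurring exactly
-- once, in first-occurrence order.
theorem B_fold (l : List Char) :
    l.foldl
      (fun (st : PySem.Set Char × PySem.Dict Char (Option Unit)) c =>
        if PySem.Set.contains st.1 c then (st.1, st.2.erase c)
        else (PySem.Set.add st.1 c, st.2.insert c none))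
      (PySem.Set.empty, PySem.Dict.empty)
    = (PySem.Set.ofList l,
       PySem.Dict.mk (((PySem.Set.ofList l).filter (fun c => l.count c == 1)).map
         (fun c => (c, (none : Option Unit))))) := by
  induction l using List.reverseRecOn with
  | nil => rfl
  | append_singleton l c ih =>
    rw [List.foldl_append, List.foldl_cons, List.foldl_nil, ih,
      PySem.Set.ofList_append_singleton]
    by_cases hc : c ∈ l
    · have hcont : PySem.Set.contains (PySem.Set.ofList l) c = true := by
        rw [PySem.Set.contains_iff]; exact (PySem.Set.mem_ofList _ _).mpr hc
      rw [if_pos hcont, PySem.Set.add_of_mem ((PySem.Set.mem_ofList _ _).mpr hc)]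
      refine Prod.ext rfl ?_
      show PySem.Dict.mk _ = PySem.Dict.mk _
      rw [PySem.Dict.mk.injEq]
      show List.filter _ (List.map _ _) = _
      rw [List.filter_map, List.filter_filter]
      refine congrArg _ (List.filter_congr fun a _ => ?_)
      by_cases hac : a = c
      · subst hac
        have : a ∈ l := hc
        simp [List.count_append, List.count_eq_zero, this]
      · simp [List.count_append, hac, Ne.symm hac]
    · have hcont : PySem.Set.contains (PySem.Set.ofList l) c = false := by
        simp [PySem.Set.mem_ofList, hc]
      rw [if_neg (by simp [PySem.Set.mem_ofList, hc]),
        PySem.Set.add_of_not_mem (fun h => hc ((PySem.Set.mem_ofList _ _).mp h))]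
      refine Prod.ext rfl ?_
      rw [PySem.Dict.ext_iff,
        PySem.Dict.items_insert_of_not_contains _ _ (by
          rw [PySem.Dict.contains_eq_decide_mem_keys]
          simp [PySem.Dict.keys, PySem.Set.mem_ofList, hc])]
      show List.map _ _ ++ _ = List.map _ (List.filter _ (_ ++ [c]))
      rw [List.filter_append, List.map_append]
      have h1 : List.filter (fun a => (l ++ [c]).count a == 1) (PySem.Set.ofList l)
          = List.filter (fun a => l.count a == 1) (PySem.Set.ofList l) := by
        refine List.filter_congr fun a ha => ?_
        have hac : a ≠ c := fun h => hc (h ▸ (PySem.Set.mem_ofList _ _).mp ha)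
        simp [List.count_append, Ne.symm hac]
      have h2 : List.filter (fun a => (l ++ [c]).count a == 1) [c] = [c] := by
        have : c ∉ l := hc
        simp [List.count_append, List.count_eq_zero, this]
      rw [h1, h2]
      rfl

-- ===== VERDICT (by name: the statement is the Claim_ definition above) =====
theorem KthNonRep1_spec : Claim_equal_KthNonRep1 := by
  intro x k _ _
  show KthNonRep1 x k = KthNonRep1_alt x k
  simp only [KthNonRep1, KthNonRep1_alt, B_fold, dictA_items]
  have hl2 :
      ((((PySem.Set.ofList x.toList).map (fun c => (c, (x.toList.count c : Int)))).filter
          (fun p => p.2 == 1)).map (fun p => p.1))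
        = (PySem.Dict.mk (((PySem.Set.ofList x.toList).filter
            (fun c => x.toList.count c == 1)).map (fun c => (c, (none : Option Unit))))).keys := by
    rw [List.filter_map]
    have hp : (fun c => ((x.toList.count c : Int) == 1)) = (fun c => (x.toList.count c == 1)) := by
      funext a
      by_cases h : x.toList.count a = 1 <;> simp [h]
    simp [PySem.Dict.keys, List.map_map, Function.comp_def, hp]
  rw [← hl2]
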